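-- pv_equiv track=rewrite | github.com/Liuguanli/LBMC | python/generators.py | linear_order_generation
-- ===== SOURCE A (Python) =====
-- bit_letters = ["A", "B", "C", "D", "E"]
--
-- def linear_order_generation(bit=12, dim=2):
--     clockwise_LO = ""
--     for i in range(dim):
--         for j in range(bit):
--             clockwise_LO += bit_letters[i]
--
--     anti_clockwise_LO = ""
--     for i in range(dim - 1, -1, -1):
--         for j in range(bit):
--             anti_clockwise_LO += bit_letters[i]
--
--     return [clockwise_LO, anti_clockwise_LO]
-- ===== SOURCE B (Python) =====
-- bit_letters = ["A", "B", "C", "D", "E"]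
--
-- def linear_order_generation(bit=12, dim=2):
--     clockwise_LO = "".join(letter * bit for letter in bit_letters[:max(dim, 0)])
--     return [clockwise_LO, clockwise_LO[::-1]]
-- ===== Notes on version B (the rewrite author's own statement) =====
-- stated objective: simpler
-- what changed: B builds the clockwise string with a single join over the first max(dim,0) letters and derives the anti-clockwise string as its reversal (each block repeats one letter), removing A's second nested accumulation loop.
import Mathlib
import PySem

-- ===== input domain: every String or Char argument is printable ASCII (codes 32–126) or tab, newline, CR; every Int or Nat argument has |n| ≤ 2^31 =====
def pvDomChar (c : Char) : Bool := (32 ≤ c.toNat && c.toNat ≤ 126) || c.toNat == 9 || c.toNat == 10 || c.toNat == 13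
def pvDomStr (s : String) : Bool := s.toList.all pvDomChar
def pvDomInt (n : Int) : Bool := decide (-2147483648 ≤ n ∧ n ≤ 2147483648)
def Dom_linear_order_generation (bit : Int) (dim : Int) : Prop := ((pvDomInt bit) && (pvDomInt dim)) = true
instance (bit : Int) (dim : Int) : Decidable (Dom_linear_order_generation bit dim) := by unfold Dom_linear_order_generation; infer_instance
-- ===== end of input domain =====

-- B builds the clockwise string in one join over the first max(dim,0) letters and obtains the
-- anti-clockwise string as its reversal (valid because every block repeats a single letter),
-- dropping A's second nested loop; objective: simpler.

-- ===== PORT A =====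
-- bit_letters, with strings as code-point lists (PySem convention: String ops go through List Char)
def pvLetters : List (List Char) := [['A'], ['B'], ['C'], ['D'], ['E']]

-- literal port of A: two nested accumulation loops; bit_letters[i] is pyGetD (total form,
-- exact under Pre_, under which the index is only reached while in range)
def linear_order_generation (bit : Int) (dim : Int) : List String :=
  let clockwise :=
    (PySem.List.pyRange 0 dim 1).foldl
      (fun acc i =>
        (PySem.List.pyRange 0 bit 1).foldl
          (fun acc2 _ => acc2 ++ PySem.List.pyGetD pvLetters i []) acc) []
  let antiClockwise :=
    (PySem.List.pyRange (dim - 1) (-1) (-1)).foldl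
      (fun acc i =>
        (PySem.List.pyRange 0 bit 1).foldl
          (fun acc2 _ => acc2 ++ PySem.List.pyGetD pvLetters i []) acc) []
  [String.ofList clockwise, String.ofList antiClockwise]

-- ===== PORT B =====
-- literal port of Source B: ''.join(letter * bit for letter in bit_letters[:max(dim, 0)]),
-- then the reversal cw[::-1] (PySem.Str.slice?_none_none_neg_one: s[::-1] is reverse)
def linear_order_generation_alt (bit : Int) (dim : Int) : List String :=
  let clockwise :=
    PySem.Chars.join []
      ((PySem.List.slice pvLetters none (some (max dim 0))).map
        (fun l => PySem.List.pyRepeat l bit))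
  [String.ofList clockwise, String.ofList clockwise.reverse]

-- ===== PRECONDITION & SPEC =====
-- Pre_ excludes exactly the inputs where A raises: for dim ≥ 6 and bit ≥ 1, A's loops index
-- bit_letters[5] and raise IndexError; everywhere else A returns and B matches it.
def Pre_linear_order_generation (bit : Int) (dim : Int) : Prop := dim ≤ 5 ∨ bit ≤ 0
instance (bit : Int) (dim : Int) : Decidable (Pre_linear_order_generation bit dim) := by unfold Pre_linear_order_generation; infer_instance
def pvWitness_linear_order_generation : Int × Int := (12, 2)

def Spec_linear_order_generation (bit : Int) (dim : Int) (out : List String) : Prop := out = linear_order_generation_alt bit dim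
instance (bit : Int) (dim : Int) (out : List String) : Decidable (Spec_linear_order_generation bit dim out) := by unfold Spec_linear_order_generation; infer_instance

-- ===== CLAIM (what is proved, stated in full; the proofs are below) =====
def Claim_equal_linear_order_generation : Prop := ∀ (bit : Int) (dim : Int), Dom_linear_order_generation bit dim → Pre_linear_order_generation bit dim → Spec_linear_order_generation bit dim (linear_order_generation bit dim)
-- ===== LEMMAS AND PROOFS =====

theorem pv_len_pyRange (b : Int) : (PySem.List.pyRange 0 b 1).length = b.toNat := by
  by_cases h : b ≤ 0
  · rw [PySem.List.pyRange_one_eq_nil h]; simp; omega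
  · have hb : b = (b.toNat : Int) := by omega
    rw [hb, PySem.List.pyRange_zero_natCast]; simp; omega

-- the inner 'for j in range(bit)' loop appends bit copies of the current letter
theorem pv_inner_fold (s : List Char) (r : List Int) (acc : List Char) :
    r.foldl (fun a (_ : Int) => a ++ s) acc = acc ++ (List.replicate r.length s).flatten := by
  induction r generalizing acc with
  | nil => simp
  | cons x xs ih => simp [ih, List.replicate_succ]

theorem pv_inner_fold' (c : Char) (bit : Int) (acc : List Char) :
    (PySem.List.pyRange 0 bit 1).foldl (fun a (_ : Int) => a ++ [c]) acc
      = acc ++ List.replicate bit.toNat c := by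
  rw [pv_inner_fold, List.flatten_replicate_singleton, pv_len_pyRange]

theorem pv_main (bit dim : Int) (hpre : Pre_linear_order_generation bit dim) :
    linear_order_generation bit dim = linear_order_generation_alt bit dim := by
  unfold linear_order_generation linear_order_generation_alt
  unfold Pre_linear_order_generation at hpre
  by_cases hbit : bit ≤ 0
  · -- bit ≤ 0: every inner range is empty, every repeat is empty
    have hin : PySem.List.pyRange 0 bit 1 = [] := PySem.List.pyRange_one_eq_nil hbit
    have hrep : ∀ l : List Char, PySem.List.pyRepeat l bit = [] := by
      intro l
      simp [PySem.List.pyRepeat]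
      omega
    simp only [hin, List.foldl_nil]
    simp only [hrep, List.foldl_fixed]
    have hj : ∀ (xs : List (List Char)) (n : ℕ),
        PySem.Chars.join [] (List.replicate n ([] : List Char)) = [] := by
      intro _ n
      induction n with
      | zero => rfl
      | succ k ih =>
        cases k with
        | zero => rfl
        | succ m =>
          simp [PySem.Chars.join, List.intercalate, List.replicate_succ] at ih ⊢
          exact ih
    rw [show ((PySem.List.slice pvLetters none (some (max dim 0))).map
          (fun _ : List Char => ([] : List Char)))
        = List.replicate (PySem.List.slice pvLetters none (some (max dim 0))).length []
      from List.map_const', hj pvLetters]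
    simp
  · have hd : dim ≤ 0 ∨ dim = 1 ∨ dim = 2 ∨ dim = 3 ∨ dim = 4 ∨ dim = 5 := by omega
    rcases hd with h | h | h | h | h | h
    · -- dim ≤ 0: both outer ranges empty, slice empty
      have h1 : PySem.List.pyRange 0 dim 1 = [] := PySem.List.pyRange_one_eq_nil h
      have h2 : PySem.List.pyRange (dim - 1) (-1) (-1) = [] := by
        rw [PySem.List.pyRange_neg_one_eq_reverse]
        rw [show (-1 : Int) + 1 = 0 by ring, show dim - 1 + 1 = dim by ring, h1]
        rfl
      have h3 : max dim 0 = 0 := by omega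
      have h4 : PySem.List.slice pvLetters none (some (0 : Int)) = [] := by decide
      simp [h1, h2, h3, h4, PySem.Chars.join, List.intercalate]
    all_goals (
      subst h
      simp only [show PySem.List.pyRange 0 1 1 = [0] from by decide,
        show PySem.List.pyRange 0 2 1 = [0, 1] from by decide,
        show PySem.List.pyRange 0 3 1 = [0, 1, 2] from by decide,
        show PySem.List.pyRange 0 4 1 = [0, 1, 2, 3] from by decide,
        show PySem.List.pyRange 0 5 1 = [0, 1, 2, 3, 4] from by decide,
        show (1 : Int) - 1 = 0 from by ring, show (2 : Int) - 1 = 1 from by ring,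
        show (3 : Int) - 1 = 2 from by ring, show (4 : Int) - 1 = 3 from by ring,
        show (5 : Int) - 1 = 4 from by ring,
        show PySem.List.pyRange 0 (-1) (-1) = [0] from by decide,
        show PySem.List.pyRange 1 (-1) (-1) = [1, 0] from by decide,
        show PySem.List.pyRange 2 (-1) (-1) = [2, 1, 0] from by decide,
        show PySem.List.pyRange 3 (-1) (-1) = [3, 2, 1, 0] from by decide,
        show PySem.List.pyRange 4 (-1) (-1) = [4, 3, 2, 1, 0] from by decide,
        show max (1 : Int) 0 = 1 from by decide, show max (2 : Int) 0 = 2 from by decide,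
        show max (3 : Int) 0 = 3 from by decide, show max (4 : Int) 0 = 4 from by decide,
        show max (5 : Int) 0 = 5 from by decide,
        show PySem.List.slice pvLetters none (some (1 : Int)) = [['A']] from by decide,
        show PySem.List.slice pvLetters none (some (2 : Int)) = [['A'], ['B']] from by decide,
        show PySem.List.slice pvLetters none (some (3 : Int)) = [['A'], ['B'], ['C']] from by decide,
        show PySem.List.slice pvLetters none (some (4 : Int)) = [['A'], ['B'], ['C'], ['D']] from by decide,
        show PySem.List.slice pvLetters none (some (5 : Int)) = [['A'], ['B'], ['C'], ['D'], ['E']] from by decide,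
        List.foldl_cons, List.foldl_nil, List.map_cons, List.map_nil,
        show PySem.List.pyGetD pvLetters 0 [] = ['A'] from by decide,
        show PySem.List.pyGetD pvLetters 1 [] = ['B'] from by decide,
        show PySem.List.pyGetD pvLetters 2 [] = ['C'] from by decide,
        show PySem.List.pyGetD pvLetters 3 [] = ['D'] from by decide,
        show PySem.List.pyGetD pvLetters 4 [] = ['E'] from by decide,
        PySem.List.pyRepeat_singleton, pv_inner_fold']
      simp [PySem.Chars.join, List.intercalate, List.reverse_append, List.reverse_replicate])

-- ===== VERDICT (by name: the statements are the Claim_ definitions above) =====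
theorem linear_order_generation_spec : Claim_equal_linear_order_generation := by
  intro bit dim _ hpre
  unfold Spec_linear_order_generation
  exact pv_main bit dim hpre
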